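-- pv_equiv track=rewrite | github.com/yyellin/relation-extraction-utils | relation_extraction_utils/internal/sync_indices.py | b_lookup_to_a_lookup
-- ===== SOURCE A (Python) =====
-- def b_lookup_to_a_lookup(list_a, list_b, list_b_lookup):
--
--     list_a_lookup = {}
--
--     index_a = 0
--     index_b = 0
--
--     matched_total = len(list_b_lookup)
--     matched_so_far = 0
--
--     while matched_so_far < matched_total and index_a < len(list_a) and index_b < len(list_b):
--
--         # Possibility 1: pointing to same token
--         if list_a[index_a] == list_b[index_b]:
--
--             for k, v in list_b_lookup.items():
--                 if v == index_b:
--                     list_a_lookup[k] = index_a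
--                     matched_so_far += 1
--
--             index_a += 1
--             index_b += 1
--             continue
--
--         # Possibility 2: b's token represent multiple tokens of a
--         b_word = list_b[index_b]
--         substring = False
--         while list_a[index_a] in b_word:
--
--             substring = True
--
--             for k, v in list_b_lookup.items():
--
--                 if v == index_b:
--
--                     if 'start' not in k or k not in list_a_lookup:
--                         list_a_lookup[k] = index_a
--
--                 # if not processing_positive_substring and v == index_b and 'start' in k:
--                 #     processing_positive_substring = True
--                 #     in_end = False
--                 #     list_a_lookup[k] = index_a
--                 #     matched_so_far += 1
--                 #     break
--                 #
--                 # if processing_positive_substring and v == index_b and 'end' in k: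
--                 #     in_end = True
--                 #     list_a_lookup[k] = index_a
--                 #     matched_so_far += 1
--                 #     break
--                 #
--
--             index_a += 1
--             if index_a == len(list_a):
--                 break
--
--         if substring:
--
--             index_b += 1
--             if index_b == len(list_b):
--                 break
--
--             continue
--
--         # Fallback: increment index of b until a match with a is found
--         while index_b < len(list_b):
--
--             tmp = index_a
--             found = False
--             while tmp < len(list_a):
--                 if list_a[tmp] == list_b[index_b]:
--                     found = True
--                     break
--                 tmp += 1
--
--             if found:
--                 index_a = tmp
--                 break
--
--             index_b += 1
--
--     return list_a_lookup
-- ===== SOURCE B (Python) =====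
-- def b_lookup_to_a_lookup(list_a, list_b, list_b_lookup):
--     # Two staged passes instead of A's interleaved walk + per-step dict scans:
--     # pass 1 walks the tokens only and records, per aligned b-index, one span
--     # record; pass 2 builds the answer from the lookup in one sorted sweep.
--
--     # how many lookup entries each b-index would satisfy (for the stop counter)
--     counts = {}
--     for v in list_b_lookup.values():
--         counts[v] = counts.get(v, 0) + 1
--
--     # pass 1: alignment trace, no lookup scanning.
--     # trace[ib] = (kind, first, last): 'm' exact match at a-index first (=last),
--     # 's' b-token covering the span first..last of a-tokens.
--     trace = {}
--     ia = 0
--     ib = 0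
--     matched = 0
--     total = len(list_b_lookup)
--     while matched < total and ia < len(list_a) and ib < len(list_b):
--         if list_a[ia] == list_b[ib]:
--             trace[ib] = ('m', ia, ia)
--             matched += counts.get(ib, 0)
--             ia += 1
--             ib += 1
--             continue
--         b_word = list_b[ib]
--         first = ia
--         sub = False
--         while list_a[ia] in b_word:
--             sub = True
--             trace[ib] = ('s', first, ia)
--             ia += 1
--             if ia == len(list_a):
--                 break
--         if sub:
--             ib += 1
--             if ib == len(list_b):
--                 break
--             continue
--         # skip b-tokens that occur nowhere in the rest of a
--         while ib < len(list_b):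
--             seg = list_a[ia:]
--             if list_b[ib] in seg:
--                 ia += seg.index(list_b[ib])
--                 break
--             ib += 1
--
--     # pass 2: one sweep over the lookup, stably sorted by target b-index
--     # (= the order in which A's walk first meets each entry).
--     out = {}
--     for k, v in sorted(list_b_lookup.items(), key=lambda kv: kv[1]):
--         rec = trace.get(v)
--         if rec is not None:
--             kind, first, last = rec
--             out[k] = first if (kind == 'm' or 'start' in k) else last
--     return out
-- ===== Notes on version B (the rewrite author's own statement) =====
-- stated objective: faster
-- what changed: B splits A's interleaved walk into two staged passes: a token-only alignment walk that records one span record per aligned b-index (no scanning of the lookup during the walk, only a precomputed per-index counter for the stop condition), and then one sweep over the lookup stably sorted by target b-index that reads each answer off the trace; A instead rescans the whole lookup dict at every alignment step and mutates the answer dict in place.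
import Mathlib
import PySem

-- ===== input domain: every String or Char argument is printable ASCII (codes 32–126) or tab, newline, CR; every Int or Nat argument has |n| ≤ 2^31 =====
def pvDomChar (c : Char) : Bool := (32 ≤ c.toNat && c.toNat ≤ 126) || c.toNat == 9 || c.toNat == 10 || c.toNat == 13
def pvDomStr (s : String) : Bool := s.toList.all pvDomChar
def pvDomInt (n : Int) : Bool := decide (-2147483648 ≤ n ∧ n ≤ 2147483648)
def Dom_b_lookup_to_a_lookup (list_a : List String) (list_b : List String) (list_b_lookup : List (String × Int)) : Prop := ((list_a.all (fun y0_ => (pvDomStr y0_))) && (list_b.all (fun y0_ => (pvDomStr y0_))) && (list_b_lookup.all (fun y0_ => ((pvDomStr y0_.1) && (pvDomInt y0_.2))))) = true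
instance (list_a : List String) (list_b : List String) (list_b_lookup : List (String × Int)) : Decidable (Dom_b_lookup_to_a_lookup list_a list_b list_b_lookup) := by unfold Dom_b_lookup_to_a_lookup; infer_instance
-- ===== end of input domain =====

-- B replaces A's interleaved walk (which rescans the whole lookup dict at every alignment
-- step) by two staged passes: a token-only walk recording one span record per aligned
-- b-index, then a single sweep over the lookup stably sorted by target b-index; objective: faster.

-- ===== PORT A =====
-- indexing helper shared by both ports: both Pythons only index within bounds (guarded), so getD is exact there
def pvGetS (xs : List String) (i : Nat) : String := xs.getD i ""

-- A's "for k, v in list_b_lookup.items(): if v == index_b: list_a_lookup[k] = index_a; matched_so_far += 1"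
def pvScanP1A (lk : List (String × Int)) (ib ia : Int) (s : PySem.Dict String Int × Int) : PySem.Dict String Int × Int :=
  lk.foldl (fun s kv => if kv.2 == ib then (s.1.insert kv.1 ia, s.2 + 1) else s) s

-- A's inner scan in the substring branch
def pvScanSubA (lk : List (String × Int)) (ib ia : Int) (d : PySem.Dict String Int) : PySem.Dict String Int :=
  lk.foldl (fun d kv =>
    if kv.2 == ib then
      (if !(PySem.Str.isIn "start" kv.1) || (d.get? kv.1).isNone then d.insert kv.1 ia else d)
    else d) d

-- A's "while list_a[index_a] in b_word: …" (fuel = list_a.length at the call site is always enough)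
def pvSubLoopA (la : List String) (lk : List (String × Int)) (bw : String) (ib : Int) :
    Nat → Nat → PySem.Dict String Int → Bool → PySem.Dict String Int × Nat × Bool
  | 0, ia, d, sub => (d, ia, sub)
  | fuel+1, ia, d, sub =>
      if PySem.Str.isIn (pvGetS la ia) bw then
        let d' := pvScanSubA lk ib (ia : Int) d
        if ia + 1 == la.length then (d', ia + 1, true)
        else pvSubLoopA la lk bw ib fuel (ia + 1) d' true
      else (d, ia, sub)

-- A's "tmp = index_a; while tmp < len(list_a): …"
def pvFindTmpA (la : List String) (x : String) (tmp : Nat) : Option Nat :=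
  if tmp < la.length then
    (if pvGetS la tmp == x then some tmp else pvFindTmpA la x (tmp + 1))
  else none
termination_by la.length - tmp

-- A's fallback "while index_b < len(list_b): …"
def pvFallbackA (la lb : List String) (ia ib : Nat) : Nat × Nat :=
  if ib < lb.length then
    match pvFindTmpA la (pvGetS lb ib) ia with
    | some t => (t, ib)
    | none => pvFallbackA la lb ia (ib + 1)
  else (ia, ib)
termination_by lb.length - ib

-- A's outer while loop (fuel la.length+lb.length+1 always suffices: each iteration with a true
-- guard strictly decreases (la.length-ia)+(lb.length-ib))
def pvLoopA (la lb : List String) (lk : List (String × Int)) (total : Int) :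
    Nat → Nat → Nat → Int → PySem.Dict String Int → PySem.Dict String Int
  | 0, _, _, _, d => d
  | fuel+1, ia, ib, m, d =>
      if m < total ∧ ia < la.length ∧ ib < lb.length then
        if pvGetS la ia == pvGetS lb ib then
          let s := pvScanP1A lk (ib : Int) (ia : Int) (d, m)
          pvLoopA la lb lk total fuel (ia + 1) (ib + 1) s.2 s.1
        else
          let r := pvSubLoopA la lk (pvGetS lb ib) (ib : Int) la.length ia d false
          if r.2.2 then
            if ib + 1 == lb.length then r.1
            else pvLoopA la lb lk total fuel r.2.1 (ib + 1) m r.1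
          else
            let p := pvFallbackA la lb ia ib
            pvLoopA la lb lk total fuel p.1 p.2 m d
      else d

def b_lookup_to_a_lookup (list_a : List String) (list_b : List String) (list_b_lookup : List (String × Int)) : List (String × Int) :=
  (pvLoopA list_a list_b list_b_lookup (list_b_lookup.length : Int)
    (list_a.length + list_b.length + 1) 0 0 0 (PySem.Dict.mk [])).items

-- ===== PORT B =====
-- B's "counts[v] = counts.get(v, 0) + 1" over list_b_lookup.values()
def pvCnt (lk : List (String × Int)) : PySem.Dict Int Int :=
  (lk.map (·.2)).foldl (fun d v => d.insert v (d.getD v 0 + 1)) PySem.Dict.empty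

-- B's "while list_a[ia] in b_word: trace[ib] = ('s', first, ia); …" (fuel = list_a.length suffices)
def pvWalkSub (la : List String) (bw : String) (ib first : Int) :
    Nat → Nat → PySem.Dict Int (String × Int × Int) → Bool →
      PySem.Dict Int (String × Int × Int) × Nat × Bool
  | 0, ia, tr, sub => (tr, ia, sub)
  | fuel+1, ia, tr, sub =>
      if PySem.Str.isIn (pvGetS la ia) bw then
        let tr' := tr.insert ib ("s", first, (ia : Int))
        if ia + 1 == la.length then (tr', ia + 1, true)
        else pvWalkSub la bw ib first fuel (ia + 1) tr' true
      else (tr, ia, sub)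

-- B's skip loop: "seg = list_a[ia:] (slice, exact for 0 ≤ ia: PySem.List.slice_from);
-- if list_b[ib] in seg: ia += seg.index(list_b[ib]) (first position = idxOf, guarded by membership)"
def pvFallB (la lb : List String) (ia : Nat) : Nat → Nat × Nat
  | ib =>
    if ib < lb.length then
      if (la.drop ia).contains (pvGetS lb ib) then
        (ia + (la.drop ia).idxOf (pvGetS lb ib), ib)
      else pvFallB la lb ia (ib + 1)
    else (ia, ib)
termination_by ib => lb.length - ib

-- B's pass-1 walk over the tokens only (same fuel bound as A's outer loop)
def pvWalkB (la lb : List String) (cnt : PySem.Dict Int Int) (total : Int) :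
    Nat → Nat → Nat → Int → PySem.Dict Int (String × Int × Int) → PySem.Dict Int (String × Int × Int)
  | 0, _, _, _, tr => tr
  | fuel+1, ia, ib, m, tr =>
      if m < total ∧ ia < la.length ∧ ib < lb.length then
        if pvGetS la ia == pvGetS lb ib then
          pvWalkB la lb cnt total fuel (ia + 1) (ib + 1) (m + cnt.getD (ib : Int) 0)
            (tr.insert (ib : Int) ("m", (ia : Int), (ia : Int)))
        else
          let q := pvWalkSub la (pvGetS lb ib) (ib : Int) (ia : Int) la.length ia tr false
          if q.2.2 then
            if ib + 1 == lb.length then q.1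
            else pvWalkB la lb cnt total fuel q.2.1 (ib + 1) m q.1
          else
            let p := pvFallB la lb ia ib
            pvWalkB la lb cnt total fuel p.1 p.2 m tr
      else tr

-- B's "out[k] = first if (kind == 'm' or 'start' in k) else last"
def pvVal (k : String) (r : String × Int × Int) : Int :=
  if r.1 == "m" || PySem.Str.isIn "start" k then r.2.1 else r.2.2

-- B's pass 2: one sweep over the lookup sorted stably by target b-index
def pvAssemble (lk : List (String × Int)) (tr : PySem.Dict Int (String × Int × Int)) :
    PySem.Dict String Int :=
  (PySem.List.sorted lk (fun kv => kv.2) false).foldl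
    (fun out kv =>
      match tr.get? kv.2 with
      | none => out
      | some r => out.insert kv.1 (pvVal kv.1 r)) PySem.Dict.empty

def b_lookup_to_a_lookup_alt (list_a : List String) (list_b : List String) (list_b_lookup : List (String × Int)) : List (String × Int) :=
  (pvAssemble list_b_lookup
    (pvWalkB list_a list_b (pvCnt list_b_lookup) (list_b_lookup.length : Int)
      (list_a.length + list_b.length + 1) 0 0 0 (PySem.Dict.mk []))).items

-- ===== PRECONDITION & SPEC =====
-- Pre_ excludes only association lists with a duplicated key, which cannot arise from the
-- Python argument (a dict): they are outside the type convention's image of dict[str,int].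
def Pre_b_lookup_to_a_lookup (list_a : List String) (list_b : List String) (list_b_lookup : List (String × Int)) : Prop :=
  (list_b_lookup.map Prod.fst).Nodup
instance (list_a : List String) (list_b : List String) (list_b_lookup : List (String × Int)) : Decidable (Pre_b_lookup_to_a_lookup list_a list_b list_b_lookup) := by unfold Pre_b_lookup_to_a_lookup; infer_instance

def pvWitness_b_lookup_to_a_lookup : List String × List String × (List (String × Int)) :=
  (["a", "b"], ["ab"], [("start1", 0), ("end1", 0)])

def Spec_b_lookup_to_a_lookup (list_a : List String) (list_b : List String) (list_b_lookup : List (String × Int)) (out : List (String × Int)) : Prop := out = b_lookup_to_a_lookup_alt list_a list_b list_b_lookup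
instance (list_a : List String) (list_b : List String) (list_b_lookup : List (String × Int)) (out : List (String × Int)) : Decidable (Spec_b_lookup_to_a_lookup list_a list_b list_b_lookup out) := by unfold Spec_b_lookup_to_a_lookup; infer_instance

-- ===== CLAIM (what is proved, stated in full; the proofs are below) =====
def Claim_equal_b_lookup_to_a_lookup : Prop := ∀ (list_a : List String) (list_b : List String) (list_b_lookup : List (String × Int)), Dom_b_lookup_to_a_lookup list_a list_b list_b_lookup → Pre_b_lookup_to_a_lookup list_a list_b list_b_lookup → Spec_b_lookup_to_a_lookup list_a list_b list_b_lookup (b_lookup_to_a_lookup list_a list_b list_b_lookup)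

-- ===== LEMMAS AND PROOFS =====

-- the common control skeleton of both walks: the end of a substring span
def pvSpan (la : List String) (bw : String) : Nat → Nat → Nat × Bool
  | 0, ia => (ia, false)
  | fuel+1, ia =>
      if PySem.Str.isIn (pvGetS la ia) bw then
        if ia + 1 == la.length then (ia + 1, true)
        else ((pvSpan la bw fuel (ia + 1)).1, true)
      else (ia, false)

-- the abstract step list both programs realize: (ib, record) per aligned b-index, in walk order
def pvSteps (la lb : List String) (lk : List (String × Int)) (total : Int) :
    Nat → Nat → Nat → Int → List (Int × (String × Int × Int))
  | 0, _, _, _ => []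
  | fuel+1, ia, ib, m =>
      if m < total ∧ ia < la.length ∧ ib < lb.length then
        if pvGetS la ia == pvGetS lb ib then
          ((ib : Int), ("m", (ia : Int), (ia : Int))) ::
            pvSteps la lb lk total fuel (ia + 1) (ib + 1)
              (m + ((lk.filter (fun kv => kv.2 == (ib : Int))).length : Int))
        else
          let q := pvSpan la (pvGetS lb ib) la.length ia
          if q.2 then
            ((ib : Int), ("s", (ia : Int), (q.1 : Int) - 1)) ::
              (if ib + 1 == lb.length then []
               else pvSteps la lb lk total fuel q.1 (ib + 1) m)
          else
            let p := pvFallB la lb ia ib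
            pvSteps la lb lk total fuel p.1 p.2 m
      else []

-- what one step contributes to the answer
def pvCanon (lk : List (String × Int)) (S : List (Int × (String × Int × Int))) : List (String × Int) :=
  S.flatMap (fun st => (lk.filter (fun kv => kv.2 == st.1)).map (fun kv => (kv.1, pvVal kv.1 st.2)))


-- lk-guarded fold = fold over the keys of the matching entries
theorem pv_foldl_guard {α : Type} (lk : List (String × Int)) (ib : Int) (f : α → String → α) (a : α) :
    lk.foldl (fun a kv => if kv.2 == ib then f a kv.1 else a) a
      = ((lk.filter (fun kv => kv.2 == ib)).map (·.1)).foldl f a := by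
  induction lk generalizing a with
  | nil => rfl
  | cons kv t ih =>
      rw [List.foldl_cons, List.filter_cons]
      cases hb : (kv.2 == ib) with
      | false => simp only [Bool.false_eq_true, if_false]; exact ih a
      | true => simp only [if_true]; rw [List.map_cons, List.foldl_cons]; exact ih (f a kv.1)

-- the per-key operation of A's substring scan
def pvSubOp (v : Int) (d : PySem.Dict String Int) (k : String) : PySem.Dict String Int :=
  if !(PySem.Str.isIn "start" k) || (d.get? k).isNone then d.insert k v else d

theorem pv_scanSubA_eq (lk : List (String × Int)) (ib ia : Int) (d : PySem.Dict String Int) :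
    pvScanSubA lk ib ia d
      = ((lk.filter (fun kv => kv.2 == ib)).map (·.1)).foldl (pvSubOp ia) d :=
  pv_foldl_guard lk ib (pvSubOp ia) d

-- entries of a Nodup-keyed list with the same key are equal
theorem pv_key_inj (lk : List (String × Int)) (h : (lk.map Prod.fst).Nodup)
    {kv kv' : String × Int} (h1 : kv ∈ lk) (h2 : kv' ∈ lk) (he : kv.1 = kv'.1) : kv = kv' :=
  List.inj_on_of_nodup_map h h1 h2 he

theorem pv_grp_nodup (lk : List (String × Int)) (h : (lk.map Prod.fst).Nodup) (p : String × Int → Bool) :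
    ((lk.filter p).map Prod.fst).Nodup :=
  ((lk.filter_sublist).map Prod.fst).nodup h

-- replacing the unique occurrence of a key in an items list
theorem pv_map_replace (base rest : List (String × Int)) (k : String) (w new : Int)
    (hb : k ∉ base.map Prod.fst) (hr : k ∉ rest.map Prod.fst) :
    (base ++ (k, w) :: rest).map (fun p => if p.1 == k then (k, new) else p)
      = base ++ (k, new) :: rest := by
  rw [List.map_append, List.map_cons]
  have h1 : base.map (fun p => if p.1 == k then (k, new) else p) = base := by
    rw [List.map_congr_left (g := id) ?_, List.map_id]
    intro p hp
    have : p.1 ≠ k := fun he => hb (he ▸ List.mem_map_of_mem hp)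
    simp only [id]
    rw [if_neg (by simpa using this)]
  have h2 : rest.map (fun p => if p.1 == k then (k, new) else p) = rest := by
    rw [List.map_congr_left (g := id) ?_, List.map_id]
    intro p hp
    have : p.1 ≠ k := fun he => hr (he ▸ List.mem_map_of_mem hp)
    simp only [id]
    rw [if_neg (by simpa using this)]
  rw [h1, h2]
  simp

-- one substring pass over fresh keys inserts every key with the current index
theorem pv_pass_fresh (ia : Int) :
    ∀ (ks : List String) (d : PySem.Dict String Int), ks.Nodup →
      (∀ k ∈ ks, d.contains k = false) →
      (ks.foldl (pvSubOp ia) d).items = d.items ++ ks.map (fun k => (k, ia)) := by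
  intro ks
  induction ks with
  | nil => intro d _ _; simp
  | cons k t ih =>
      intro d hnd hf
      have hck : d.contains k = false := hf k (by simp)
      have hnone : (d.get? k).isNone = true := by
        rw [(PySem.Dict.get?_eq_none_iff_contains d k).mpr hck]; rfl
      have hop : pvSubOp ia d k = d.insert k ia := by
        simp [pvSubOp, hnone]
      rw [List.foldl_cons, hop, ih (d.insert k ia) (List.nodup_cons.mp hnd).2 ?_]
      · rw [PySem.Dict.items_insert_of_not_contains d ia hck]
        simp
      · intro k' hk'
        have hne : (k' == k) = false := by
          simp only [beq_eq_false_iff_ne, ne_eq]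
          exact fun he => (List.nodup_cons.mp hnd).1 (he ▸ hk')
        rw [PySem.Dict.contains_insert, hne, Bool.false_or]
        exact hf k' (List.mem_cons_of_mem _ hk')

-- a later substring pass over present keys rewrites exactly the non-'start' values in place
theorem pv_pass_present (new : Int) (f0 : String → Int) :
    ∀ (ks : List String) (base : List (String × Int)) (d : PySem.Dict String Int),
      d.items = base ++ ks.map (fun k => (k, f0 k)) → ks.Nodup →
      (∀ k ∈ ks, k ∉ base.map Prod.fst) →
      (ks.foldl (pvSubOp new) d).items
        = base ++ ks.map (fun k => (k, if PySem.Str.isIn "start" k then f0 k else new)) := by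
  intro ks
  induction ks with
  | nil => intro base d h _ _; simpa using h
  | cons k t ih =>
      intro base d h hnd hdisj
      have hkmem : k ∈ d.keys := by
        simp only [PySem.Dict.keys, h, List.map_append, List.map_cons]
        exact List.mem_append_right _ (by simp)
      have hck : d.contains k = true := by
        rw [PySem.Dict.contains_eq_decide_mem_keys]; simpa using hkmem
      have hnone : (d.get? k).isNone = false := by
        cases hg : d.get? k with
        | none => rw [(PySem.Dict.get?_eq_none_iff_contains d k).mp hg] at hck; cases hck
        | some r => rfl
      rw [List.foldl_cons]
      cases hs : PySem.Str.isIn "start" k with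
      | true =>
          have hop : pvSubOp new d k = d := by
            simp only [pvSubOp, hs, hnone, Bool.not_true, Bool.or_self, Bool.false_eq_true, if_false]
          rw [hop, List.map_cons,
            ih (base ++ [(k, f0 k)]) d (by simpa using h) (List.nodup_cons.mp hnd).2 ?_]
          · rw [if_pos hs]; simp
          · intro k' hk'
            simp only [List.map_append, List.mem_append, List.map_cons]
            rintro (hc | hc)
            · exact hdisj k' (List.mem_cons_of_mem _ hk') hc
            · simp only [List.map_nil, List.mem_singleton] at hc
              exact (List.nodup_cons.mp hnd).1 (hc ▸ hk')
      | false =>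
          have hop : pvSubOp new d k = d.insert k new := by
            simp only [pvSubOp, hs, Bool.not_false, Bool.true_or, if_true]
          have hitems : (d.insert k new).items = base ++ (k, new) :: t.map (fun k => (k, f0 k)) := by
            rw [PySem.Dict.items_insert_of_contains d new hck, h, List.map_cons]
            exact pv_map_replace base (t.map (fun k => (k, f0 k))) k (f0 k) new
              (fun hc => hdisj k (by simp) hc)
              (by
                simp only [List.map_map]
                intro hc
                have : k ∈ t := by simpa using hc
                exact (List.nodup_cons.mp hnd).1 this)
          rw [hop, List.map_cons,
            ih (base ++ [(k, new)]) (d.insert k new) (by simpa using hitems)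
              (List.nodup_cons.mp hnd).2 ?_]
          · rw [if_neg (by rw [hs]; exact Bool.false_ne_true)]; simp
          · intro k' hk'
            simp only [List.map_append, List.mem_append, List.map_cons]
            rintro (hc | hc)
            · exact hdisj k' (List.mem_cons_of_mem _ hk') hc
            · simp only [List.map_nil, List.mem_singleton] at hc
              exact (List.nodup_cons.mp hnd).1 (hc ▸ hk')

theorem pv_eq_mk {κ ν : Type} [BEq κ] (d : PySem.Dict κ ν) (l : List (κ × ν)) (h : d.items = l) :
    d = PySem.Dict.mk l := PySem.Dict.ext h

theorem pv_span_stuck (la : List String) (bw : String) :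
    ∀ (fuel j : Nat), (pvSpan la bw fuel j).2 = false → (pvSpan la bw fuel j).1 = j := by
  intro fuel j
  cases fuel with
  | zero => intro _; rfl
  | succ n =>
      rw [pvSpan]
      cases hin : PySem.Str.isIn (pvGetS la j) bw with
      | false => intro _; rfl
      | true =>
          by_cases hl : (j + 1 == la.length) = true <;> simp [hl]

theorem pv_map_fst_pair {ν : Type} (l : List (String × Int)) (g : String → ν) :
    (l.map Prod.fst).map (fun k => (k, g k)) = l.map (fun kv => (kv.1, g kv.1)) := by
  rw [List.map_map]; rfl

-- B's substring loop realizes one span record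
theorem pv_walkSub_eq (la : List String) (bw : String) (ib first : Int) :
    ∀ (fuel ia : Nat) (tr : PySem.Dict Int (String × Int × Int)) (sub : Bool),
      pvWalkSub la bw ib first fuel ia tr sub
        = (if (pvSpan la bw fuel ia).2
            then tr.insert ib ("s", first, ((pvSpan la bw fuel ia).1 : Int) - 1) else tr,
           (pvSpan la bw fuel ia).1, sub || (pvSpan la bw fuel ia).2) := by
  intro fuel
  induction fuel with
  | zero => intro ia tr sub; simp [pvWalkSub, pvSpan]
  | succ n ih =>
      intro ia tr sub
      rw [pvWalkSub, pvSpan]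
      cases hin : PySem.Str.isIn (pvGetS la ia) bw with
      | false => simp
      | true =>
          simp only [if_true]
          by_cases hl : (ia + 1 == la.length) = true
          · simp only [hl, if_true]
            have : ((ia : Int) + 1) - 1 = (ia : Int) := by omega
            simp [this]
          · have hl' : (ia + 1 == la.length) = false := by
              cases h' : (ia + 1 == la.length) with
              | true => exact absurd h' hl
              | false => rfl
            simp only [hl', Bool.false_eq_true, if_false, ih]
            cases hf : (pvSpan la bw n (ia + 1)).2 with
            | true => simp [PySem.Dict.insert_insert_self]
            | false =>
                have h1 : (pvSpan la bw n (ia + 1)).1 = ia + 1 := pv_span_stuck la bw n (ia + 1) hf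
                have : ((ia : Int) + 1) - 1 = (ia : Int) := by omega
                simp [h1, this]

-- A's substring loop, continuation phase: all group keys already present
theorem pv_subrest (la : List String) (lk : List (String × Int)) (bw : String) (ib : Int) (f : Int)
    (hnod : (lk.map Prod.fst).Nodup) :
    ∀ (fuel j : Nat) (prev : Int) (d : PySem.Dict String Int) (base : List (String × Int)),
      d.items = base ++ (lk.filter (fun kv => kv.2 == ib)).map
          (fun kv => (kv.1, if PySem.Str.isIn "start" kv.1 then f else prev)) →
      (∀ k ∈ (lk.filter (fun kv => kv.2 == ib)).map Prod.fst, k ∉ base.map Prod.fst) →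
      pvSubLoopA la lk bw ib fuel j d true
        = (PySem.Dict.mk (base ++ (lk.filter (fun kv => kv.2 == ib)).map
            (fun kv => (kv.1, if PySem.Str.isIn "start" kv.1 then f
              else (if (pvSpan la bw fuel j).2 then ((pvSpan la bw fuel j).1 : Int) - 1 else prev)))),
           (pvSpan la bw fuel j).1, true) := by
  intro fuel
  induction fuel with
  | zero =>
      intro j prev d base h hdisj
      have hd := pv_eq_mk d _ h
      rw [hd]
      simp [pvSubLoopA, pvSpan]
  | succ n ih =>
      intro j prev d base h hdisj
      rw [pvSubLoopA]
      cases hin : PySem.Str.isIn (pvGetS la j) bw with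
      | false =>
          have hspan : pvSpan la bw (n + 1) j = (j, false) := by
            rw [pvSpan, hin]; simp
          have hd := pv_eq_mk d _ h
          rw [hspan, hd]
          simp
      | true =>
          simp only [if_true]
          have hd' : (pvScanSubA lk ib (j : Int) d).items
              = base ++ (lk.filter (fun kv => kv.2 == ib)).map
                  (fun kv => (kv.1, if PySem.Str.isIn "start" kv.1 then f else (j : Int))) := by
            rw [pv_scanSubA_eq]
            rw [pv_pass_present (j : Int) (fun k => if PySem.Str.isIn "start" k then f else prev)
              _ base d (by rw [h, pv_map_fst_pair]) (pv_grp_nodup lk hnod _) hdisj]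
            rw [pv_map_fst_pair]
            congr 1
            apply List.map_congr_left
            intro kv _
            cases hs : PySem.Str.isIn "start" kv.1 <;> simp [hs]
          by_cases hl : (j + 1 == la.length) = true
          · have hspan : pvSpan la bw (n + 1) j = (j + 1, true) := by
              rw [pvSpan, hin, hl]; simp
            rw [if_pos hl, hspan]
            have hv : ((j + 1 : Nat) : Int) - 1 = (j : Int) := by push_cast; ring
            have hd'' := pv_eq_mk _ _ hd'
            rw [hd'']
            simp [hv]
          · rw [if_neg hl]
            have hl' : (j + 1 == la.length) = false := by
              rw [Bool.eq_false_iff]; exact hl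
            have hspan : pvSpan la bw (n + 1) j = ((pvSpan la bw n (j + 1)).1, true) := by
              rw [pvSpan, hin, hl']; simp
            rw [hspan, ih (j + 1) (j : Int) _ base hd' hdisj]
            simp only [if_true]
            have hv : (if (pvSpan la bw n (j + 1)).2
                  then ((pvSpan la bw n (j + 1)).1 : Int) - 1 else (j : Int))
                = ((pvSpan la bw n (j + 1)).1 : Int) - 1 := by
              cases hf : (pvSpan la bw n (j + 1)).2 with
              | true => rfl
              | false =>
                  rw [pv_span_stuck la bw n (j + 1) hf]
                  push_cast; ring
            rw [hv]

-- A's substring loop from fresh group keys realizes the same span record as B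
theorem pv_subA (la : List String) (lk : List (String × Int)) (bw : String) (ib : Int)
    (hnod : (lk.map Prod.fst).Nodup) :
    ∀ (fuel j : Nat) (d : PySem.Dict String Int),
      (∀ k ∈ (lk.filter (fun kv => kv.2 == ib)).map Prod.fst, d.contains k = false) →
      pvSubLoopA la lk bw ib fuel j d false
        = (if (pvSpan la bw fuel j).2
            then PySem.Dict.mk (d.items ++ (lk.filter (fun kv => kv.2 == ib)).map
              (fun kv => (kv.1, pvVal kv.1 ("s", (j : Int), ((pvSpan la bw fuel j).1 : Int) - 1))))
            else d,
           (pvSpan la bw fuel j).1, (pvSpan la bw fuel j).2) := by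
  intro fuel
  cases fuel with
  | zero => intro j d _; simp [pvSubLoopA, pvSpan]
  | succ n =>
      intro j d hfresh
      rw [pvSubLoopA]
      cases hin : PySem.Str.isIn (pvGetS la j) bw with
      | false =>
          have hspan : pvSpan la bw (n + 1) j = (j, false) := by
            rw [pvSpan, hin]; simp
          rw [hspan]
          simp
      | true =>
          simp only [if_true]
          have hsm : (("s" : String) == "m") = false := by decide
          have hd1 : (pvScanSubA lk ib (j : Int) d).items
              = d.items ++ ((lk.filter (fun kv => kv.2 == ib)).map (·.1)).map
                  (fun k => (k, (j : Int))) := by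
            rw [pv_scanSubA_eq]
            exact pv_pass_fresh (j : Int) _ d (pv_grp_nodup lk hnod _) hfresh
          by_cases hl : (j + 1 == la.length) = true
          · have hspan : pvSpan la bw (n + 1) j = (j + 1, true) := by
              rw [pvSpan, hin, hl]; simp
            rw [if_pos hl, hspan]
            have hv : ((j + 1 : Nat) : Int) - 1 = (j : Int) := by push_cast; ring
            have hd1' := pv_eq_mk _ _ hd1
            rw [hd1']
            simp only [if_true, hv]
            rw [pv_map_fst_pair]
            have : ∀ kv : String × Int,
                pvVal kv.1 ("s", (j : Int), (j : Int)) = (j : Int) := by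
              intro kv
              unfold pvVal
              cases hs : PySem.Str.isIn "start" kv.1 <;> simp [hsm, hs]
            simp only [this]
          · rw [if_neg hl]
            have hl' : (j + 1 == la.length) = false := by
              rw [Bool.eq_false_iff]; exact hl
            have hspan : pvSpan la bw (n + 1) j = ((pvSpan la bw n (j + 1)).1, true) := by
              rw [pvSpan, hin, hl']; simp
            have hd1'' : (pvScanSubA lk ib (j : Int) d).items
                = d.items ++ (lk.filter (fun kv => kv.2 == ib)).map
                    (fun kv => (kv.1, if PySem.Str.isIn "start" kv.1 then (j : Int)
                      else (j : Int))) := by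
              rw [hd1, pv_map_fst_pair]
              congr 1
              apply List.map_congr_left
              intro kv _
              simp
            have hdisj : ∀ k ∈ (lk.filter (fun kv => kv.2 == ib)).map Prod.fst,
                k ∉ d.items.map Prod.fst := by
              intro k hk
              have hc := hfresh k hk
              rw [PySem.Dict.contains_eq_decide_mem_keys] at hc
              have hk2 : k ∉ d.keys := by simpa using hc
              exact hk2
            rw [pv_subrest la lk bw ib (j : Int) hnod n (j + 1) (j : Int) _ d.items hd1'' hdisj,
              hspan]
            simp only [if_true]
            have hv : ∀ kv : String × Int,
                (if PySem.Str.isIn "start" kv.1 then (j : Int)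
                  else (if (pvSpan la bw n (j + 1)).2
                    then ((pvSpan la bw n (j + 1)).1 : Int) - 1 else (j : Int)))
                = pvVal kv.1 ("s", (j : Int), ((pvSpan la bw n (j + 1)).1 : Int) - 1) := by
              intro kv
              unfold pvVal
              cases hf : (pvSpan la bw n (j + 1)).2 with
              | true => cases hs : PySem.Str.isIn "start" kv.1 <;> simp [hsm, hs]
              | false =>
                  have h1 := pv_span_stuck la bw n (j + 1) hf
                  cases hs : PySem.Str.isIn "start" kv.1 <;> simp [hsm, hs, h1] <;> push_cast <;> ring
            simp only [hv]

-- the two fallback scans compute the same pair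
theorem pv_find_eq (la : List String) (x : String) :
    ∀ tmp, pvFindTmpA la x tmp
      = (if x ∈ la.drop tmp then some (tmp + (la.drop tmp).idxOf x) else none) := by
  intro tmp
  induction hn : la.length - tmp using Nat.strong_induction_on generalizing tmp with
  | _ n ih =>
    rw [pvFindTmpA]
    by_cases h : tmp < la.length
    · have hd : la.drop tmp = la[tmp] :: la.drop (tmp + 1) := List.drop_eq_getElem_cons h
      have hg : pvGetS la tmp = la[tmp] := by
        simp [pvGetS, List.getD_eq_getElem?_getD, List.getElem?_eq_getElem h]
      rw [if_pos h, hg, hd]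
      by_cases he : la[tmp] = x
      · simp [he]
      · have hb : (la[tmp] == x) = false := by simp [he]
        simp only [hb, Bool.false_eq_true, if_false]
        rw [ih (la.length - (tmp + 1)) (by omega) (tmp + 1) rfl]
        by_cases hm : x ∈ la.drop (tmp + 1)
        · have hm' : x ∈ la[tmp] :: la.drop (tmp + 1) := List.mem_cons_of_mem _ hm
          rw [if_pos hm, if_pos hm']
          rw [List.idxOf_cons_ne _ he]
          congr 1
          omega
        · have hm' : ¬ x ∈ la[tmp] :: la.drop (tmp + 1) := by
            intro hc
            rcases List.mem_cons.mp hc with hc | hc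
            · exact he hc.symm
            · exact hm hc
          rw [if_neg hm, if_neg hm']
    · rw [if_neg h]
      have hnil : la.drop tmp = [] := List.drop_eq_nil_of_le (by omega)
      simp [hnil]

theorem pv_fallback_eq (la lb : List String) :
    ∀ ib ia, pvFallbackA la lb ia ib = pvFallB la lb ia ib := by
  intro ib
  induction hn : lb.length - ib using Nat.strong_induction_on generalizing ib with
  | _ n ih =>
    intro ia
    rw [pvFallbackA, pvFallB, pv_find_eq]
    by_cases h : ib < lb.length
    · by_cases hm : pvGetS lb ib ∈ la.drop ia
      · simp [h, hm]
      · simp [h, hm, ih (lb.length - (ib + 1)) (by omega) (ib + 1) rfl]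
    · simp [h]

theorem pv_fallB_ge (la lb : List String) :
    ∀ ib ia, ib ≤ (pvFallB la lb ia ib).2 := by
  intro ib
  induction hn : lb.length - ib using Nat.strong_induction_on generalizing ib with
  | _ n ih =>
    intro ia
    rw [pvFallB]
    by_cases h : ib < lb.length
    · by_cases hm : (la.drop ia).contains (pvGetS lb ib)
      · have hmem : pvGetS lb ib ∈ la.drop ia := by simpa using hm
        simp [h, hmem]
      · simp only [h, if_true, hm, Bool.false_eq_true, if_false]
        exact Nat.le_of_succ_le (ih (lb.length - (ib + 1)) (by omega) (ib + 1) rfl ia)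
    · simp [h]

-- the stop counter equals the number of lookup entries aimed at the index
theorem pv_cnt_getD (lk : List (String × Int)) (v : Int) :
    (pvCnt lk).getD v 0 = ((lk.filter (fun kv => kv.2 == v)).length : Int) := by
  unfold pvCnt
  rw [PySem.Dict.getD_foldl_insert_add_one, PySem.Dict.getD_empty]
  have : (lk.map (fun kv => kv.2)).count v = (lk.filter (fun kv => kv.2 == v)).length := by
    rw [List.count_eq_countP, List.countP_map, List.countP_eq_length_filter]
    rfl
  simp [this]

-- step indices are bounded below and strictly increasing
theorem pv_steps_lb (la lb : List String) (lk : List (String × Int)) (total : Int) :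
    ∀ (fuel ia ib : Nat) (m : Int),
      ∀ st ∈ pvSteps la lb lk total fuel ia ib m, (ib : Int) ≤ st.1 := by
  intro fuel
  induction fuel with
  | zero => intro ia ib m st hst; cases hst
  | succ n ih =>
      intro ia ib m st hst
      rw [pvSteps] at hst
      by_cases hg : m < total ∧ ia < la.length ∧ ib < lb.length
      · rw [if_pos hg] at hst
        by_cases he : (pvGetS la ia == pvGetS lb ib) = true
        · rw [if_pos he] at hst
          rcases List.mem_cons.mp hst with h | h
          · subst h; exact le_refl _
          · have := ih (ia + 1) (ib + 1) _ st h
            push_cast at this ⊢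
            omega
        · rw [if_neg he] at hst
          by_cases hq : (pvSpan la (pvGetS lb ib) la.length ia).2 = true
          · simp only [hq, if_true] at hst
            rcases List.mem_cons.mp hst with h | h
            · subst h; exact le_refl _
            · by_cases hl : (ib + 1 == lb.length) = true
              · rw [if_pos hl] at h; cases h
              · rw [if_neg hl] at h
                have := ih _ (ib + 1) _ st h
                push_cast at this ⊢
                omega
          · have hq' : (pvSpan la (pvGetS lb ib) la.length ia).2 = false := by
              cases h' : (pvSpan la (pvGetS lb ib) la.length ia).2
              · rfl
              · exact absurd h' hq
            simp only [hq', Bool.false_eq_true, if_false] at hst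
            have h2 := ih _ _ _ st hst
            have h3 := pv_fallB_ge la lb ib ia
            have : (ib : Int) ≤ ((pvFallB la lb ia ib).2 : Int) := by exact_mod_cast h3
            omega
      · rw [if_neg hg] at hst; cases hst

theorem pv_steps_inc (la lb : List String) (lk : List (String × Int)) (total : Int) :
    ∀ (fuel ia ib : Nat) (m : Int),
      (pvSteps la lb lk total fuel ia ib m).Pairwise (fun a b => a.1 < b.1) := by
  intro fuel
  induction fuel with
  | zero => intro ia ib m; exact List.Pairwise.nil
  | succ n ih =>
      intro ia ib m
      rw [pvSteps]
      by_cases hg : m < total ∧ ia < la.length ∧ ib < lb.length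
      · rw [if_pos hg]
        by_cases he : (pvGetS la ia == pvGetS lb ib) = true
        · rw [if_pos he]
          refine List.Pairwise.cons ?_ (ih _ _ _)
          intro st hst
          have := pv_steps_lb la lb lk total n (ia + 1) (ib + 1) _ st hst
          push_cast at this ⊢
          omega
        · rw [if_neg he]
          by_cases hq : (pvSpan la (pvGetS lb ib) la.length ia).2 = true
          · simp only [hq, if_true]
            refine List.Pairwise.cons ?_ ?_
            · intro st hst
              by_cases hl : (ib + 1 == lb.length) = true
              · rw [if_pos hl] at hst; cases hst
              · rw [if_neg hl] at hst
                have := pv_steps_lb la lb lk total n _ (ib + 1) _ st hst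
                push_cast at this ⊢
                omega
            · by_cases hl : (ib + 1 == lb.length) = true
              · rw [if_pos hl]; exact List.Pairwise.nil
              · rw [if_neg hl]; exact ih _ _ _
          · have hq' : (pvSpan la (pvGetS lb ib) la.length ia).2 = false := by
              cases h' : (pvSpan la (pvGetS lb ib) la.length ia).2
              · rfl
              · exact absurd h' hq
            simp only [hq', Bool.false_eq_true, if_false]
            exact ih _ _ _
      · rw [if_neg hg]; exact List.Pairwise.nil

theorem pv_p1A (ks : List String) (ia : Int) (d : PySem.Dict String Int) (m : Int) :
    ks.foldl (fun s k => (s.1.insert k ia, s.2 + 1)) (d, m)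
      = (ks.foldl (fun d k => d.insert k ia) d, m + ks.length) := by
  induction ks generalizing d m with
  | nil => simp
  | cons k t ih => simp [ih]; ring

theorem pv_not_contains_iff {κ ν : Type} [BEq κ] [LawfulBEq κ] [DecidableEq κ]
    (d : PySem.Dict κ ν) (k : κ) : d.contains k = false ↔ k ∉ d.keys := by
  rw [PySem.Dict.contains_eq_decide_mem_keys]
  simp

theorem pv_ks_fresh (lk : List (String × Int)) (ib : Int) (d : PySem.Dict String Int)
    (hfresh : ∀ kv ∈ lk, ib ≤ kv.2 → d.contains kv.1 = false) :
    ∀ k ∈ (lk.filter (fun kv => kv.2 == ib)).map (·.1), d.contains k = false := by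
  intro k hk
  simp only [List.mem_map, List.mem_filter] at hk
  obtain ⟨kv, ⟨hkv, hv⟩, hke⟩ := hk
  have h2 : kv.2 = ib := by simpa using hv
  exact hke ▸ hfresh kv hkv (le_of_eq h2.symm)

theorem pv_ks_not_mem (lk : List (String × Int)) (hnod : (lk.map Prod.fst).Nodup) (ib : Int)
    {kv : String × Int} (hkv : kv ∈ lk) (hgt : ib < kv.2) :
    kv.1 ∉ (lk.filter (fun kv => kv.2 == ib)).map (·.1) := by
  intro hk
  simp only [List.mem_map, List.mem_filter] at hk
  obtain ⟨kv', ⟨hkv', hv⟩, hke⟩ := hk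
  have h2 : kv'.2 = ib := by simpa using hv
  have heq : kv = kv' := pv_key_inj lk hnod hkv hkv' hke.symm
  rw [heq, h2] at hgt
  omega

theorem pv_keys_append {κ ν : Type} [BEq κ] (d1 d : PySem.Dict κ ν) (l : List (κ × ν))
    (h : d1.items = d.items ++ l) : d1.keys = d.keys ++ l.map Prod.fst := by
  simp only [PySem.Dict.keys, h, List.map_append]

-- bookkeeping after one step: keys gain exactly the step's group keys
theorem pv_after_step (lk : List (String × Int)) (hnod : (lk.map Prod.fst).Nodup)
    (ib : Nat) (d d1 : PySem.Dict String Int) (g : String × Int → Int)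
    (hkeys : d.keys.Nodup)
    (hfresh : ∀ kv ∈ lk, (ib : Int) ≤ kv.2 → d.contains kv.1 = false)
    (h1 : d1.items = d.items
      ++ (lk.filter (fun kv => kv.2 == (ib : Int))).map (fun kv => (kv.1, g kv))) :
    d1.keys.Nodup ∧ (∀ kv ∈ lk, ((ib + 1 : Nat) : Int) ≤ kv.2 → d1.contains kv.1 = false) := by
  have hkeq : d1.keys = d.keys ++ (lk.filter (fun kv => kv.2 == (ib : Int))).map (·.1) := by
    rw [pv_keys_append d1 d _ h1, List.map_map]
    rfl
  have hknodup : ((lk.filter (fun kv => kv.2 == (ib : Int))).map (·.1)).Nodup :=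
    pv_grp_nodup lk hnod _
  constructor
  · rw [hkeq, List.nodup_append]
    refine ⟨hkeys, hknodup, ?_⟩
    intro a ha b hb heq
    have := pv_ks_fresh lk (ib : Int) d hfresh b hb
    rw [pv_not_contains_iff] at this
    exact this (heq ▸ ha)
  · intro kv hkv hle
    rw [pv_not_contains_iff, hkeq]
    intro hmem
    rcases List.mem_append.mp hmem with hmem | hmem
    · have := hfresh kv hkv (by push_cast at hle ⊢; omega)
      rw [pv_not_contains_iff] at this
      exact this hmem
    · exact pv_ks_not_mem lk hnod (ib : Int) hkv (by push_cast at hle ⊢; omega) hmem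

-- A's outer loop materializes exactly the canonical contributions of the steps
theorem pv_loopA_items (la lb : List String) (lk : List (String × Int)) (total : Int)
    (hnod : (lk.map Prod.fst).Nodup) :
    ∀ (fuel ia ib : Nat) (m : Int) (d : PySem.Dict String Int),
      d.keys.Nodup →
      (∀ kv ∈ lk, (ib : Int) ≤ kv.2 → d.contains kv.1 = false) →
      (pvLoopA la lb lk total fuel ia ib m d).items
        = d.items ++ pvCanon lk (pvSteps la lb lk total fuel ia ib m) := by
  intro fuel
  induction fuel with
  | zero => intro ia ib m d _ _; simp [pvLoopA, pvSteps, pvCanon]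
  | succ n ih =>
      intro ia ib m d hkeys hfresh
      simp only [pvLoopA, pvSteps]
      by_cases hg : m < total ∧ ia < la.length ∧ ib < lb.length
      · rw [if_pos hg, if_pos hg]
        by_cases he : (pvGetS la ia == pvGetS lb ib) = true
        · rw [if_pos he, if_pos he]
          have hscan : pvScanP1A lk (ib : Int) (ia : Int) (d, m)
              = (((lk.filter (fun kv => kv.2 == (ib : Int))).map (·.1)).foldl
                    (fun d k => d.insert k (ia : Int)) d,
                 m + (((lk.filter (fun kv => kv.2 == (ib : Int))).map (·.1)).length : Int)) := by
            unfold pvScanP1A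
            rw [pv_foldl_guard lk (ib : Int) (fun s k => (s.1.insert k (ia : Int), s.2 + 1)) (d, m)]
            exact pv_p1A _ _ _ _
          have hfreshks := pv_ks_fresh lk (ib : Int) d (fun kv h1 h2 => hfresh kv h1 h2)
          have hknodup : ((lk.filter (fun kv => kv.2 == (ib : Int))).map (·.1)).Nodup :=
            pv_grp_nodup lk hnod _
          have hitems1 : (((lk.filter (fun kv => kv.2 == (ib : Int))).map (·.1)).foldl
                (fun d k => d.insert k (ia : Int)) d).items
              = d.items ++ (lk.filter (fun kv => kv.2 == (ib : Int))).map
                  (fun kv => (kv.1, (ia : Int))) := by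
            rw [PySem.Dict.items_foldl_insert_fresh _ (fun a => a) (fun _ => (ia : Int)) d
              hfreshks (by simpa using hknodup)]
            rw [pv_map_fst_pair]
          obtain ⟨hkeys1, hfresh1⟩ := pv_after_step lk hnod ib d _ (fun _ => (ia : Int))
            hkeys hfresh hitems1
          have hlen : (((lk.filter (fun kv => kv.2 == (ib : Int))).map (·.1)).length : Int)
              = ((lk.filter (fun kv => kv.2 == (ib : Int))).length : Int) := by
            simp
          simp only [hscan, hlen]
          rw [ih (ia + 1) (ib + 1) _ _ hkeys1 hfresh1, hitems1]
          have hcanon : pvCanon lk ((((ib : Nat) : Int), ("m", (ia : Int), (ia : Int)))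
                :: pvSteps la lb lk total n (ia + 1) (ib + 1)
                     (m + ((lk.filter (fun kv => kv.2 == (ib : Int))).length : Int)))
              = (lk.filter (fun kv => kv.2 == (ib : Int))).map (fun kv => (kv.1, (ia : Int)))
                ++ pvCanon lk (pvSteps la lb lk total n (ia + 1) (ib + 1)
                     (m + ((lk.filter (fun kv => kv.2 == (ib : Int))).length : Int))) := by
            rw [pvCanon, List.flatMap_cons]
            rfl
          rw [hcanon, List.append_assoc]
        · rw [if_neg he, if_neg he]
          have hfreshks := pv_ks_fresh lk (ib : Int) d (fun kv h1 h2 => hfresh kv h1 h2)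
          have hsub := pv_subA la lk (pvGetS lb ib) (ib : Int) hnod la.length ia d hfreshks
          simp only [hsub]
          cases hq : (pvSpan la (pvGetS lb ib) la.length ia).2 with
          | true =>
              simp only [hq, if_true]
              have hitems1 : (PySem.Dict.mk (d.items
                    ++ (lk.filter (fun kv => kv.2 == (ib : Int))).map
                      (fun kv => (kv.1, pvVal kv.1 ("s", (ia : Int),
                        ((pvSpan la (pvGetS lb ib) la.length ia).1 : Int) - 1))))).items
                  = d.items ++ (lk.filter (fun kv => kv.2 == (ib : Int))).map
                      (fun kv => (kv.1, pvVal kv.1 ("s", (ia : Int),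
                        ((pvSpan la (pvGetS lb ib) la.length ia).1 : Int) - 1))) := rfl
              obtain ⟨hkeys1, hfresh1⟩ := pv_after_step lk hnod ib d _
                (fun kv => pvVal kv.1 ("s", (ia : Int),
                  ((pvSpan la (pvGetS lb ib) la.length ia).1 : Int) - 1))
                hkeys hfresh hitems1
              by_cases hl : (ib + 1 == lb.length) = true
              · rw [if_pos hl, if_pos hl]
                simp [pvCanon]
              · rw [if_neg hl, if_neg hl]
                rw [ih _ (ib + 1) _ _ hkeys1 hfresh1]
                simp [pvCanon, List.append_assoc]
          | false =>
              simp only [hq, Bool.false_eq_true, if_false]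
              rw [pv_fallback_eq]
              have hge := pv_fallB_ge la lb ib ia
              rw [ih (pvFallB la lb ia ib).1 (pvFallB la lb ia ib).2 m d hkeys ?_]
              intro kv hkv hle
              refine hfresh kv hkv ?_
              have : ((ib : Nat) : Int) ≤ (((pvFallB la lb ia ib).2 : Nat) : Int) := by
                exact_mod_cast hge
              omega
      · rw [if_neg hg, if_neg hg]
        simp [pvCanon]

-- B's walk materializes exactly the step list as its trace
theorem pv_walkB_items (la lb : List String) (lk : List (String × Int)) (total : Int) :
    ∀ (fuel ia ib : Nat) (m : Int) (tr : PySem.Dict Int (String × Int × Int)),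
      (∀ j : Nat, ib ≤ j → tr.contains (j : Int) = false) →
      (pvWalkB la lb (pvCnt lk) total fuel ia ib m tr).items
        = tr.items ++ pvSteps la lb lk total fuel ia ib m := by
  intro fuel
  induction fuel with
  | zero => intro ia ib m tr _; simp [pvWalkB, pvSteps]
  | succ n ih =>
      intro ia ib m tr hfr
      simp only [pvWalkB, pvSteps]
      by_cases hg : m < total ∧ ia < la.length ∧ ib < lb.length
      · rw [if_pos hg, if_pos hg]
        by_cases he : (pvGetS la ia == pvGetS lb ib) = true
        · rw [if_pos he, if_pos he]
          have hc : tr.contains ((ib : Nat) : Int) = false := hfr ib (le_refl ib)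
          have hfr1 : ∀ j : Nat, ib + 1 ≤ j →
              (tr.insert ((ib : Nat) : Int) ("m", (ia : Int), (ia : Int))).contains
                ((j : Nat) : Int) = false := by
            intro j hj
            rw [PySem.Dict.contains_insert]
            have hne : (((j : Nat) : Int) == ((ib : Nat) : Int)) = false := by
              simp only [beq_eq_false_iff_ne, ne_eq, Int.natCast_inj]
              omega
            rw [hne, Bool.false_or]
            exact hfr j (by omega)
          rw [pv_cnt_getD lk ((ib : Nat) : Int)]
          rw [ih (ia + 1) (ib + 1) _ _ hfr1]
          rw [PySem.Dict.items_insert_of_not_contains tr _ hc]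
          simp
        · rw [if_neg he, if_neg he]
          rw [pv_walkSub_eq la (pvGetS lb ib) ((ib : Nat) : Int) ((ia : Nat) : Int) la.length ia tr false]
          cases hq : (pvSpan la (pvGetS lb ib) la.length ia).2 with
          | true =>
              simp only [hq, if_true, Bool.false_or]
              have hc : tr.contains ((ib : Nat) : Int) = false := hfr ib (le_refl ib)
              have hfr1 : ∀ j : Nat, ib + 1 ≤ j →
                  (tr.insert ((ib : Nat) : Int) ("s", (ia : Int),
                    ((pvSpan la (pvGetS lb ib) la.length ia).1 : Int) - 1)).contains
                    ((j : Nat) : Int) = false := by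
                intro j hj
                rw [PySem.Dict.contains_insert]
                have hne : (((j : Nat) : Int) == ((ib : Nat) : Int)) = false := by
                  simp only [beq_eq_false_iff_ne, ne_eq, Int.natCast_inj]
                  omega
                rw [hne, Bool.false_or]
                exact hfr j (by omega)
              by_cases hl : (ib + 1 == lb.length) = true
              · rw [if_pos hl, if_pos hl]
                rw [PySem.Dict.items_insert_of_not_contains tr _ hc]
              · rw [if_neg hl, if_neg hl]
                rw [ih _ (ib + 1) _ _ hfr1]
                rw [PySem.Dict.items_insert_of_not_contains tr _ hc]
                simp
          | false =>
              simp only [hq, Bool.false_eq_true, if_false, Bool.or_false]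
              have hge := pv_fallB_ge la lb ib ia
              rw [ih (pvFallB la lb ia ib).1 (pvFallB la lb ia ib).2 m tr ?_]
              intro j hj
              exact hfr j (by omega)
      · rw [if_neg hg, if_neg hg]
        simp

-- skipping the trace misses = folding over the entries whose index was aligned
theorem pv_fold_assemble (tr : PySem.Dict Int (String × Int × Int)) :
    ∀ (xs : List (String × Int)) (out : PySem.Dict String Int),
      xs.foldl (fun out kv =>
          match tr.get? kv.2 with
          | none => out
          | some r => out.insert kv.1 (pvVal kv.1 r)) out
        = (xs.filter (fun kv => tr.contains kv.2)).foldl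
            (fun out kv => out.insert kv.1 (pvVal kv.1 (tr.getD kv.2 ("", 0, 0)))) out := by
  intro xs
  induction xs with
  | nil => intro out; rfl
  | cons kv t ih =>
      intro out
      rw [List.foldl_cons, List.filter_cons]
      cases hg : tr.get? kv.2 with
      | none =>
          have hc : tr.contains kv.2 = false := (PySem.Dict.get?_eq_none_iff_contains tr kv.2).mp hg
          simp only [hc, Bool.false_eq_true, if_false]
          exact ih out
      | some r =>
          have hc : tr.contains kv.2 = true := by
            by_contra hcn
            have : tr.contains kv.2 = false := by
              cases h' : tr.contains kv.2
              · rfl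
              · exact absurd h' hcn
            rw [(PySem.Dict.get?_eq_none_iff_contains tr kv.2).mpr this] at hg
            cases hg
          have hgd : tr.getD kv.2 ("", 0, 0) = r := by
            rw [PySem.Dict.getD_eq_get?_getD, hg]; rfl
          simp only [hc, if_true, List.foldl_cons, hgd]
          exact ih (out.insert kv.1 (pvVal kv.1 r))

-- insertion into a list, characterized by takeWhile/dropWhile
theorem pv_insertBy_char {α : Type} (before : α → α → Bool) (x : α) :
    ∀ ys : List α, PySem.List.insertBy before x ys
      = ys.takeWhile (fun y => !before x y) ++ x :: ys.dropWhile (fun y => !before x y) := by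
  intro ys
  induction ys with
  | nil => rfl
  | cons y t ih =>
      cases hb : before x y with
      | true => simp [PySem.List.insertBy, hb]
      | false => simp [PySem.List.insertBy, hb, ih]

theorem pv_dropWhile_lt (q : Int) :
    ∀ (acc : List (String × Int)), acc.Pairwise (fun a b => a.2 ≤ b.2) →
      ∀ y ∈ acc.dropWhile (fun y => !decide (q < y.2)), q < y.2 := by
  intro acc
  induction acc with
  | nil => intro _ y hy; cases hy
  | cons a t ih =>
      intro hp y hy
      rw [List.dropWhile_cons] at hy
      by_cases hq : q < a.2
      · simp only [hq, decide_true, Bool.not_true, Bool.false_eq_true, if_false] at hy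
        rcases List.mem_cons.mp hy with h | h
        · exact h ▸ hq
        · exact lt_of_lt_of_le hq ((List.pairwise_cons.mp hp).1 y h)
      · simp only [hq, decide_false, Bool.not_false, if_true] at hy
        exact ih (List.pairwise_cons.mp hp).2 y hy

-- STABILITY: sorting by the index does not disturb the entries aimed at one index
theorem pv_sorted_filter_eq (c : Int) (l : List (String × Int)) :
    (PySem.List.sorted l (fun kv => kv.2) false).filter (fun kv => kv.2 == c)
      = l.filter (fun kv => kv.2 == c) := by
  induction l using List.reverseRecOn with
  | nil => rfl
  | append_singleton l x ih =>
      have hstep : PySem.List.sorted (l ++ [x]) (fun kv => kv.2) false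
          = PySem.List.insertBy (fun a b => decide (a.2 < b.2)) x
              (PySem.List.sorted l (fun kv => kv.2) false) := by
        rw [PySem.List.sorted_eq_foldl_insertBy, PySem.List.sorted_eq_foldl_insertBy,
          List.foldl_append, List.foldl_cons, List.foldl_nil]
      have hpw : (PySem.List.sorted l (fun kv => kv.2) false).Pairwise (fun a b => a.2 ≤ b.2) :=
        PySem.List.sorted_pairwise l (fun kv => kv.2)
      set acc := PySem.List.sorted l (fun kv => kv.2) false with hacc
      have hsplit : acc.filter (fun kv => kv.2 == c)
          = (acc.takeWhile (fun y => !decide (x.2 < y.2))).filter (fun kv => kv.2 == c)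
            ++ (acc.dropWhile (fun y => !decide (x.2 < y.2))).filter (fun kv => kv.2 == c) := by
        rw [← List.filter_append, List.takeWhile_append_dropWhile]
      by_cases hx : (x.2 == c) = true
      · have hxc : x.2 = c := by simpa using hx
        have hd0 : (acc.dropWhile (fun y => !decide (x.2 < y.2))).filter
            (fun kv => kv.2 == c) = [] := by
          rw [List.filter_eq_nil_iff]
          intro kv hkv
          have hlt2 := pv_dropWhile_lt x.2 acc hpw kv hkv
          rw [hxc] at hlt2
          have : kv.2 ≠ c := by omega
          simpa using this
        rw [hstep, pv_insertBy_char, List.filter_append, List.filter_cons, hx, if_pos rfl,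
          List.filter_append, List.filter_cons, List.filter_nil, hx, if_pos rfl, hd0]
        rw [hsplit, hd0, List.append_nil] at ih
        rw [ih]
      · rw [Bool.not_eq_true] at hx
        rw [hstep, pv_insertBy_char, List.filter_append, List.filter_cons, hx,
          List.filter_append, List.filter_cons, List.filter_nil, hx]
        simp only [Bool.false_eq_true, if_false, List.append_nil]
        rw [← hsplit, ih]

theorem pv_filter_or_split (c : Int) (rest : List Int) (hlt : ∀ r ∈ rest, c < r) :
    ∀ xs : List (String × Int), xs.Pairwise (fun a b => a.2 ≤ b.2) →
      xs.filter (fun kv => kv.2 == c || decide (kv.2 ∈ rest))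
        = xs.filter (fun kv => kv.2 == c) ++ xs.filter (fun kv => decide (kv.2 ∈ rest)) := by
  intro xs
  induction xs with
  | nil => intro _; rfl
  | cons a t ih =>
      intro hp
      have hpt := (List.pairwise_cons.mp hp).2
      have hhd := (List.pairwise_cons.mp hp).1
      rw [List.filter_cons, List.filter_cons, List.filter_cons]
      by_cases hc : (a.2 == c) = true
      · have hxc : a.2 = c := by simpa using hc
        have hnm : (decide (a.2 ∈ rest)) = false := by
          apply decide_eq_false
          intro hm
          have := hlt a.2 hm
          omega
        have hor : (a.2 == c || decide (a.2 ∈ rest)) = true := by rw [hc]; rfl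
        rw [hor, if_pos rfl, hc, if_pos rfl, hnm]
        simp only [Bool.false_eq_true, if_false]
        rw [ih hpt, List.cons_append]
      · rw [Bool.not_eq_true] at hc
        by_cases hm : a.2 ∈ rest
        · have hgt : c < a.2 := hlt a.2 hm
          have ht0 : t.filter (fun kv => kv.2 == c) = [] := by
            rw [List.filter_eq_nil_iff]
            intro kv hkv
            have h2 : a.2 ≤ kv.2 := hhd kv hkv
            have : kv.2 ≠ c := by omega
            simpa using this
          have hor : (a.2 == c || decide (a.2 ∈ rest)) = true := by
            rw [hc, decide_eq_true hm]; rfl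
          rw [hor, if_pos rfl, hc, decide_eq_true hm, if_pos rfl]
          simp only [Bool.false_eq_true, if_false]
          rw [ih hpt, ht0]
          simp
        · have hor : (a.2 == c || decide (a.2 ∈ rest)) = false := by
            rw [hc, decide_eq_false hm]; rfl
          rw [hor, hc, decide_eq_false hm]
          simp only [Bool.false_eq_true, if_false]
          exact ih hpt

-- GROUPING: the sorted sweep visits the entries grouped by aligned index, in index order
theorem pv_sorted_group (lk : List (String × Int)) :
    ∀ (vs : List Int), vs.Pairwise (· < ·) →
      (PySem.List.sorted lk (fun kv => kv.2) false).filter (fun kv => decide (kv.2 ∈ vs))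
        = vs.flatMap (fun v => lk.filter (fun kv => kv.2 == v)) := by
  intro vs
  induction vs with
  | nil => intro _; simp
  | cons v rest ih =>
      intro hp
      have hpw : (PySem.List.sorted lk (fun kv => kv.2) false).Pairwise
          (fun a b => a.2 ≤ b.2) := PySem.List.sorted_pairwise lk (fun kv => kv.2)
      have hpred : ∀ kv : String × Int,
          (decide (kv.2 ∈ v :: rest)) = (kv.2 == v || decide (kv.2 ∈ rest)) := by
        intro kv
        by_cases h : kv.2 = v <;> simp [h, List.mem_cons]
      have h1 : (PySem.List.sorted lk (fun kv => kv.2) false).filter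
            (fun kv => decide (kv.2 ∈ v :: rest))
          = (PySem.List.sorted lk (fun kv => kv.2) false).filter
              (fun kv => kv.2 == v || decide (kv.2 ∈ rest)) := by
        exact List.filter_congr (fun kv _ => hpred kv)
      rw [h1, pv_filter_or_split v rest (fun r hr => (List.pairwise_cons.mp hp).1 r hr) _ hpw,
        pv_sorted_filter_eq, ih (List.pairwise_cons.mp hp).2, List.flatMap_cons]

-- B's pass 2 produces the canonical contributions of the steps
theorem pv_assemble_items (lk : List (String × Int)) (S : List (Int × (String × Int × Int)))
    (hnod : (lk.map Prod.fst).Nodup) (hinc : S.Pairwise (fun a b => a.1 < b.1))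
    (tr : PySem.Dict Int (String × Int × Int)) (htr : tr.items = S) :
    (pvAssemble lk tr).items = pvCanon lk S := by
  unfold pvAssemble
  rw [pv_fold_assemble tr _ PySem.Dict.empty]
  have hkeys : tr.keys = S.map Prod.fst := by
    simp only [PySem.Dict.keys, htr]
  have hSinc : (S.map Prod.fst).Pairwise (· < ·) := List.pairwise_map.mpr hinc
  have hnodS : (S.map Prod.fst).Nodup := hSinc.imp ne_of_lt
  have hfil : (PySem.List.sorted lk (fun kv => kv.2) false).filter (fun kv => tr.contains kv.2)
      = (PySem.List.sorted lk (fun kv => kv.2) false).filter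
          (fun kv => decide (kv.2 ∈ S.map Prod.fst)) := by
    apply List.filter_congr
    intro kv _
    rw [PySem.Dict.contains_eq_decide_mem_keys, hkeys]
  rw [hfil]
  have hperm : ((PySem.List.sorted lk (fun kv => kv.2) false).map Prod.fst).Perm
      (lk.map Prod.fst) := (PySem.List.sorted_perm lk (fun kv => kv.2) false).map Prod.fst
  have hsnod : ((PySem.List.sorted lk (fun kv => kv.2) false).map Prod.fst).Nodup :=
    hperm.nodup_iff.mpr hnod
  have hLnodup : (((PySem.List.sorted lk (fun kv => kv.2) false).filter
        (fun kv => decide (kv.2 ∈ S.map Prod.fst))).map Prod.fst).Nodup :=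
    (((PySem.List.sorted lk (fun kv => kv.2) false).filter_sublist).map Prod.fst).nodup hsnod
  refine Eq.trans (PySem.Dict.items_foldl_insert_fresh _ (fun kv : String × Int => kv.1)
    (fun kv => pvVal kv.1 (tr.getD kv.2 ("", 0, 0))) PySem.Dict.empty
    (fun a _ => rfl) hLnodup) ?_
  have h0 : (PySem.Dict.empty : PySem.Dict String Int).items = [] := rfl
  rw [h0, List.nil_append]
  rw [pv_sorted_group lk (S.map Prod.fst) hSinc]
  have htrnod : tr.keys.Nodup := by rw [hkeys]; exact hnodS
  rw [List.map_flatMap, List.flatMap_map]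
  have hinner : ∀ st ∈ S,
      (lk.filter (fun kv => kv.2 == st.1)).map
          (fun kv => (kv.1, pvVal kv.1 (tr.getD kv.2 ("", 0, 0))))
        = (lk.filter (fun kv => kv.2 == st.1)).map
            (fun kv => (kv.1, pvVal kv.1 st.2)) := by
    intro st hst
    apply List.map_congr_left
    intro kv hkv
    have hv : kv.2 = st.1 := by
      have := (List.mem_filter.mp hkv).2
      simpa using this
    have hmem : (st.1, st.2) ∈ tr.items := by
      rw [htr, Prod.mk.eta]
      exact hst
    have hgd : tr.getD st.1 ("", 0, 0) = st.2 :=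
      PySem.Dict.getD_of_mem_items tr hmem htrnod ("", 0, 0)
    rw [hv, hgd]
  calc S.flatMap (fun st => (lk.filter (fun kv => kv.2 == st.1)).map
          (fun kv => (kv.1, pvVal kv.1 (tr.getD kv.2 ("", 0, 0)))))
      = S.flatMap (fun st => (lk.filter (fun kv => kv.2 == st.1)).map
          (fun kv => (kv.1, pvVal kv.1 st.2))) := by
        simp only [List.flatMap]
        exact congrArg List.flatten (List.map_congr_left hinner)
    _ = pvCanon lk S := rfl

-- ===== VERDICT (by name: the statement is the Claim_ definition above) =====
theorem b_lookup_to_a_lookup_spec : Claim_equal_b_lookup_to_a_lookup := by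
  intro la lb lk _ hpre
  unfold Spec_b_lookup_to_a_lookup b_lookup_to_a_lookup b_lookup_to_a_lookup_alt
  have hnod : (lk.map Prod.fst).Nodup := hpre
  have hA := pv_loopA_items la lb lk (lk.length : Int) hnod
    (la.length + lb.length + 1) 0 0 0 (PySem.Dict.mk [])
    (by simp [PySem.Dict.keys]) (by intro kv _ _; rfl)
  have hB := pv_walkB_items la lb lk (lk.length : Int)
    (la.length + lb.length + 1) 0 0 0 (PySem.Dict.mk [])
    (by intro j _; rfl)
  rw [hA]
  rw [pv_assemble_items lk
    (pvSteps la lb lk (lk.length : Int) (la.length + lb.length + 1) 0 0 0) hnod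
    (pv_steps_inc la lb lk (lk.length : Int) (la.length + lb.length + 1) 0 0 0)
    _ (by simpa using hB)]
  rfl
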